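-- pv_equiv track=rewrite | github.com/KPRDROP/kpr | tap.py | replace_urls_only
-- ===== SOURCE A (Python) =====
-- def replace_urls_only(lines, new_urls):
--     replaced = []
--     url_idx = 0
--     for line in lines:
--         if line.strip().startswith("http") and url_idx < len(new_urls):
--             replaced.append(new_urls[url_idx])
--             url_idx += 1
--         else:
--             replaced.append(line)
--     return replaced
-- ===== SOURCE B (Python) =====
-- def replace_urls_only(lines, new_urls):
--     result = list(lines)
--     positions = [i for i, line in enumerate(result) if line.strip().startswith("http")]
--     for pos, url in zip(positions, new_urls):
--         result[pos] = url
--     return result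
-- ===== Notes on version B (the rewrite author's own statement) =====
-- stated objective: alternative
-- what changed: Replaces the interleaved single loop carrying a url counter with two passes: collect the indices of http-lines, then overwrite those indices with zip(positions, new_urls), zip truncation giving the cutoff.
import Mathlib
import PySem

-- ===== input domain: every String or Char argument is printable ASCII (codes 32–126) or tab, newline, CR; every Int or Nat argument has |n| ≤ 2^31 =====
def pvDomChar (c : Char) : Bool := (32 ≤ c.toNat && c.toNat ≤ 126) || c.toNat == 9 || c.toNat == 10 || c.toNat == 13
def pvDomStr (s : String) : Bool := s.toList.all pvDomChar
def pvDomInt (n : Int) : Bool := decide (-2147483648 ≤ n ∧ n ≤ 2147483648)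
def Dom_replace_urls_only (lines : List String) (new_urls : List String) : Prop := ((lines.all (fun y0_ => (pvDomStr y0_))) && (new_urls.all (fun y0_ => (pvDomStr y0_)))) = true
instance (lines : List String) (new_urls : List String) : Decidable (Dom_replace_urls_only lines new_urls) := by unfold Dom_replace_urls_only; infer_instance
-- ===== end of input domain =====

-- B replaces A's single loop carrying a url counter by two passes: collect the indices of
-- http-lines, then overwrite those indices with zip(positions, new_urls); same cost, different decomposition.

-- ===== PORT A =====
def replace_urls_only (lines : List String) (new_urls : List String) : List String :=
  (lines.foldl
    (fun (st : List String × Nat) line =>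
      if PySem.Str.startswith (PySem.Str.strip line) "http" = true ∧ st.2 < new_urls.length then
        (st.1 ++ [PySem.List.pyGetD new_urls (st.2 : Int) ""], st.2 + 1)
      else
        (st.1 ++ [line], st.2))
    ([], 0)).1

-- ===== PORT B =====
def replace_urls_only_alt (lines : List String) (new_urls : List String) : List String :=
  let result := lines
  let positions := (PySem.List.enumerate result 0).filterMap
      (fun p => if PySem.Str.startswith (PySem.Str.strip p.2) "http" = true then some p.1 else none)
  (positions.zip new_urls).foldl (fun res pu => PySem.List.pySetD res pu.1 pu.2) result

-- ===== PRECONDITION & SPEC =====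
def Spec_replace_urls_only (lines : List String) (new_urls : List String) (out : List String) : Prop := out = replace_urls_only_alt lines new_urls
instance (lines : List String) (new_urls : List String) (out : List String) : Decidable (Spec_replace_urls_only lines new_urls out) := by unfold Spec_replace_urls_only; infer_instance

-- ===== CLAIM (what is proved, stated in full; the proofs are below) =====
def Claim_equal_replace_urls_only : Prop := ∀ (lines : List String) (new_urls : List String), Dom_replace_urls_only lines new_urls → Spec_replace_urls_only lines new_urls (replace_urls_only lines new_urls)

-- ===== LEMMAS AND PROOFS =====

-- common reference function (generic in the line predicate f): consume the url list while walking the lines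
def pvGo (f : String → Bool) : List String → List String → List String
  | [], _ => []
  | l :: ls, urls =>
    if f l = true then
      match urls with
      | [] => l :: pvGo f ls []
      | u :: us => u :: pvGo f ls us
    else l :: pvGo f ls urls

lemma pvGo_nil (f : String → Bool) (ls : List String) : pvGo f ls [] = ls := by
  induction ls with
  | nil => rfl
  | cons l ls ih =>
    simp only [pvGo]
    split
    · rw [ih]
    · rw [ih]

-- A's fold, generalized over accumulator and counter
lemma pvA_fold (f : String → Bool) (new_urls : List String) (lines : List String) :
    ∀ (acc : List String) (k : Nat),
    (lines.foldl
      (fun (st : List String × Nat) line =>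
        if f line = true ∧ st.2 < new_urls.length then
          (st.1 ++ [PySem.List.pyGetD new_urls (st.2 : Int) ""], st.2 + 1)
        else
          (st.1 ++ [line], st.2))
      (acc, k)).1 = acc ++ pvGo f lines (new_urls.drop k) := by
  induction lines with
  | nil => intro acc k; simp [pvGo]
  | cons l ls ih =>
    intro acc k
    by_cases hp : f l = true
    · by_cases hk : k < new_urls.length
      · have hdrop : new_urls.drop k = new_urls[k] :: new_urls.drop (k + 1) :=
          List.drop_eq_getElem_cons hk
        have hget : PySem.List.pyGetD new_urls (k : Int) "" = new_urls[k] := by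
          simp [PySem.List.pyGetD_natCast, List.getD, List.getElem?_eq_getElem hk]
        simp only [List.foldl_cons, if_pos (And.intro hp hk)]
        rw [ih, hdrop]
        simp only [pvGo, if_pos hp, hget, List.append_assoc, List.singleton_append]
      · have hdrop : new_urls.drop k = [] := List.drop_eq_nil_of_le (by omega)
        simp only [List.foldl_cons,
          if_neg (by tauto : ¬ (f l = true ∧ k < new_urls.length))]
        rw [ih, hdrop]
        simp only [pvGo, if_pos hp, pvGo_nil, List.append_assoc, List.singleton_append]
    · simp only [List.foldl_cons,
        if_neg (by tauto : ¬ (f l = true ∧ k < new_urls.length))]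
      rw [ih]
      simp only [pvGo, if_neg hp, List.append_assoc, List.singleton_append]

-- B's position list, structurally
def pvPos (f : String → Bool) (xs : List String) : List Int :=
  (PySem.List.enumerate xs 0).filterMap (fun p => if f p.2 = true then some p.1 else none)

lemma pvEnum_shift (f : String → Bool) (xs : List String) : ∀ (s : Int),
    (PySem.List.enumerate xs (s + 1)).filterMap (fun p => if f p.2 = true then some p.1 else none)
    = ((PySem.List.enumerate xs s).filterMap
        (fun p => if f p.2 = true then some p.1 else none)).map (· + 1) := by
  induction xs with
  | nil => intro s; simp [PySem.List.enumerate_nil]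
  | cons x xs ih =>
    intro s
    simp only [PySem.List.enumerate_cons, List.filterMap_cons]
    by_cases hp : f x = true
    · simp only [if_pos hp, ih (s + 1), List.map_cons]
    · simp only [if_neg hp, ih (s + 1)]

lemma pvPos_cons (f : String → Bool) (l : String) (ls : List String) :
    pvPos f (l :: ls) =
      (if f l = true then [(0 : Int)] else []) ++ (pvPos f ls).map (· + 1) := by
  unfold pvPos
  simp only [PySem.List.enumerate_cons, List.filterMap_cons]
  rw [show (0 : Int) + 1 = 0 + 1 from rfl, pvEnum_shift f ls 0]
  by_cases hp : f l = true
  · simp [if_pos hp]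
  · simp [if_neg hp]

lemma pvPos_nonneg (f : String → Bool) (ls : List String) : ∀ p ∈ pvPos f ls, 0 ≤ p := by
  induction ls with
  | nil => intro p hp; simp [pvPos, PySem.List.enumerate_nil] at hp
  | cons l ls ih =>
    intro p hp
    rw [pvPos_cons] at hp
    rcases List.mem_append.mp hp with h | h
    · split at h <;> simp at h; omega
    · rcases List.mem_map.mp h with ⟨q, hq, rfl⟩
      have := ih q hq; omega

-- shifting every position by one skips the head of the result list
lemma pvSet_shift (pus : List (Int × String)) :
    ∀ (x : String) (xs : List String), (∀ pu ∈ pus, 0 ≤ pu.1) →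
    (pus.map (Prod.map (· + 1) id)).foldl
        (fun res pu => PySem.List.pySetD res pu.1 pu.2) (x :: xs)
      = x :: pus.foldl (fun res pu => PySem.List.pySetD res pu.1 pu.2) xs := by
  induction pus with
  | nil => intro x xs _; rfl
  | cons pu pus ih =>
    intro x xs hnn
    have h0 : 0 ≤ pu.1 := hnn pu (List.mem_cons_self ..)
    have hset : PySem.List.pySetD (x :: xs) (pu.1 + 1) pu.2
        = x :: PySem.List.pySetD xs pu.1 pu.2 := by
      rw [PySem.List.pySetD_of_nonneg _ _ (by omega),
          PySem.List.pySetD_of_nonneg _ _ h0]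
      have h1 : (pu.1 + 1).toNat = pu.1.toNat + 1 := by omega
      rw [h1]; rfl
    simp only [List.map_cons, List.foldl_cons, Prod.map, id_eq, hset]
    exact ih x _ (fun q hq => hnn q (List.mem_cons_of_mem _ hq))

lemma pvB_spec (f : String → Bool) (lines : List String) : ∀ (urls : List String),
    ((pvPos f lines).zip urls).foldl
        (fun res pu => PySem.List.pySetD res pu.1 pu.2) lines
      = pvGo f lines urls := by
  induction lines with
  | nil => intro urls; simp [pvPos, PySem.List.enumerate_nil, pvGo]
  | cons l ls ih =>
    intro urls
    rw [pvPos_cons]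
    by_cases hp : f l = true
    · rw [if_pos hp]
      cases urls with
      | nil => simp only [List.zip_nil_right, List.foldl_nil, pvGo, if_pos hp, pvGo_nil]
      | cons u us =>
        simp only [List.cons_append, List.nil_append, List.zip_cons_cons, List.foldl_cons]
        have hset : PySem.List.pySetD (l :: ls) (0 : Int) u = u :: ls := by
          rw [PySem.List.pySetD_of_nonneg _ _ le_rfl]; rfl
        rw [hset, List.zip_map_left, pvSet_shift]
        · rw [ih us]; simp only [pvGo, if_pos hp]
        · intro pu hpu
          exact pvPos_nonneg f ls _ (List.of_mem_zip hpu).1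
    · rw [if_neg hp]
      simp only [List.nil_append]
      rw [List.zip_map_left, pvSet_shift]
      · rw [ih urls]; simp only [pvGo, if_neg hp]
      · intro pu hpu
        exact pvPos_nonneg f ls _ (List.of_mem_zip hpu).1

-- ===== VERDICT (by name: the statement is the Claim_ definition above) =====
theorem replace_urls_only_spec : Claim_equal_replace_urls_only := by
  intro lines new_urls _
  unfold Spec_replace_urls_only replace_urls_only replace_urls_only_alt
  have hA := pvA_fold (fun line => PySem.Str.startswith (PySem.Str.strip line) "http")
      new_urls lines [] 0
  have hB := pvB_spec (fun line => PySem.Str.startswith (PySem.Str.strip line) "http")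
      lines new_urls
  simp only [List.drop_zero, List.nil_append] at hA
  unfold pvPos at hB
  simp only [] at hA hB
  rw [hA, ← hB]
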